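-- pv_equiv track=rewrite | github.com/mikele228/haroma | core/neural_branches.py | normalize_neural_branches
-- ===== SOURCE A (Python) =====
-- from typing import Sequence, Tuple
--
-- def normalize_neural_branches(branches: Sequence[str]) -> list[str]:
--     """Return sorted unique branch names (acquire order for multi-branch read locks)."""
--     seen: set[str] = set()
--     out: list[str] = []
--     for raw in branches:
--         b = str(raw).strip()
--         if not b or b in seen:
--             continue
--         seen.add(b)
--         out.append(b)
--     out.sort()
--     return out
-- ===== SOURCE B (Python) =====
-- def normalize_neural_branches(branches):
--     """Return sorted unique branch names (acquire order for multi-branch read locks)."""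
--     names = sorted(s for raw in branches if (s := str(raw).strip()))
--     out = []
--     prev = None
--     for name in names:
--         if name != prev:
--             out.append(name)
--             prev = name
--     return out
-- ===== Notes on version B (the rewrite author's own statement) =====
-- stated objective: alternative
-- what changed: B drops the 'seen' hash set entirely: it sorts the stripped non-empty names first and dedups in one adjacency pass that keeps only a 'prev' value, instead of A's order-preserving set-based dedup followed by a sort.
import Mathlib
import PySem

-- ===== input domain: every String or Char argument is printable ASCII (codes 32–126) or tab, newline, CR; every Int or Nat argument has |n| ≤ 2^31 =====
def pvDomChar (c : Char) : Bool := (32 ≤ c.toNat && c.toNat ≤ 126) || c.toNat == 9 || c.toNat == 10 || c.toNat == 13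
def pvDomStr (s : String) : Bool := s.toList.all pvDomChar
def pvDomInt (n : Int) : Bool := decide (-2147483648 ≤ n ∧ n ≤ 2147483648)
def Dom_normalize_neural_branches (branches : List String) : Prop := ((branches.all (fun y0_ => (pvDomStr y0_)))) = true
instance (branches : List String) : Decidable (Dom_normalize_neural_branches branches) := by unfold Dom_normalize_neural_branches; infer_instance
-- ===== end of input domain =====

-- B replaces A's 'seen'-set dedup-then-sort by sort-first plus a single adjacency pass keeping only the previous value (alternative decomposition, same cost).

-- ===== PORT A =====
-- A: loop building (seen, out), skipping empty/already-seen stripped names, then sort out.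
def normalize_neural_branches (branches : List String) : List String :=
  PySem.List.sorted
    (branches.foldl (fun (st : PySem.Set String × List String) raw =>
      let b := PySem.Str.strip raw
      if b = "" ∨ PySem.Set.contains st.1 b then st
      else (PySem.Set.add st.1 b, st.2 ++ [b])) (PySem.Set.empty, [])).2
    (fun x => x) false

-- ===== PORT B =====
-- B: sort the stripped non-empty names, then dedup by adjacency with a 'prev' value.
def normalize_neural_branches_alt (branches : List String) : List String :=
  ((PySem.List.sorted
      (branches.filterMap (fun raw =>
        let s := PySem.Str.strip raw
        if s = "" then none else some s))
      (fun x => x) false).foldl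
    (fun (st : List String × Option String) name =>
      if some name ≠ st.2 then (st.1 ++ [name], some name) else st) ([], none)).1

-- ===== PRECONDITION & SPEC =====
def Spec_normalize_neural_branches (branches : List String) (out : List String) : Prop := out = normalize_neural_branches_alt branches
instance (branches : List String) (out : List String) : Decidable (Spec_normalize_neural_branches branches out) := by unfold Spec_normalize_neural_branches; infer_instance

-- ===== CLAIM (what is proved, stated in full; the proofs are below) =====
def Claim_equal_normalize_neural_branches : Prop := ∀ (branches : List String), Dom_normalize_neural_branches branches → Spec_normalize_neural_branches branches (normalize_neural_branches branches)

-- ===== LEMMAS AND PROOFS =====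

-- names of A's inline step functions (definitionally equal to the port's lambdas)
def pvStepA (st : PySem.Set String × List String) (raw : String) : PySem.Set String × List String :=
  let b := PySem.Str.strip raw
  if b = "" ∨ PySem.Set.contains st.1 b then st
  else (PySem.Set.add st.1 b, st.2 ++ [b])

def pvG (s : List String) (raw : String) : List String :=
  let b := PySem.Str.strip raw
  if b = "" ∨ PySem.Set.contains s b then s else s ++ [b]

def pvStripOpt (raw : String) : Option String :=
  let s := PySem.Str.strip raw
  if s = "" then none else some s

def pvStepB (st : List String × Option String) (name : String) : List String × Option String :=
  if some name ≠ st.2 then (st.1 ++ [name], some name) else st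

-- adjacency dedup as a structural recursion (the meaning of B's fold)
def pvAdj : Option String → List String → List String
  | _, [] => []
  | p, n :: rest => if some n ≠ p then n :: pvAdj (some n) rest else pvAdj p rest

theorem pvAdj_foldl (l : List String) (out : List String) (p : Option String) :
    (l.foldl pvStepB (out, p)).1 = out ++ pvAdj p l := by
  induction l generalizing out p with
  | nil => simp [pvAdj]
  | cons n rest ih =>
    rw [List.foldl_cons]
    rw [show pvAdj p (n :: rest)
        = if some n ≠ p then n :: pvAdj (some n) rest else pvAdj p rest from rfl]
    by_cases h : some n = p
    · rw [if_neg (by simp [h]), show pvStepB (out, p) n = (out, p) from by simp [pvStepB, h], ih]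
    · rw [if_pos (by simp [h]),
        show pvStepB (out, p) n = (out ++ [n], some n) from by simp [pvStepB, h], ih]
      simp

theorem pvStepA_pair (s : List String) (raw : String) :
    pvStepA (s, s) raw = (pvG s raw, pvG s raw) := by
  unfold pvStepA pvG
  by_cases h : PySem.Str.strip raw = "" ∨ PySem.Set.contains s (PySem.Str.strip raw) = true
  · simp only [h, if_pos]
  · have he : ¬ PySem.Str.strip raw = "" := fun he => h (Or.inl he)
    have hc : ¬ PySem.Set.contains s (PySem.Str.strip raw) = true := fun hc => h (Or.inr hc)
    have hm : PySem.Str.strip raw ∉ s := by simpa using hc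
    simp [PySem.Set.add, he, hm]

-- A's pair fold keeps seen = out
theorem pvA_pair (l : List String) (s : List String) :
    l.foldl pvStepA (s, s) = (l.foldl pvG s, l.foldl pvG s) := by
  induction l generalizing s with
  | nil => rfl
  | cons raw rest ih =>
    simp only [List.foldl_cons]
    rw [pvStepA_pair]
    exact ih (pvG s raw)

theorem pvG_eq_add (s : List String) (raw : String) (he : ¬ PySem.Str.strip raw = "") :
    pvG s raw = PySem.Set.add s (PySem.Str.strip raw) := by
  unfold pvG PySem.Set.add
  simp [he]

-- A's single-list fold is Set.ofList of the stripped non-empty names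
theorem pvA_set (l : List String) (s : List String) :
    l.foldl pvG s = (l.filterMap pvStripOpt).foldl PySem.Set.add s := by
  induction l generalizing s with
  | nil => rfl
  | cons raw rest ih =>
    by_cases he : PySem.Str.strip raw = ""
    · have h1 : pvG s raw = s := by simp [pvG, he]
      have h2 : pvStripOpt raw = none := by simp [pvStripOpt, he]
      rw [List.foldl_cons, h1, List.filterMap_cons, h2, ih]
    · have h2 : pvStripOpt raw = some (PySem.Str.strip raw) := by simp [pvStripOpt, he]
      rw [List.foldl_cons, pvG_eq_add s raw he, List.filterMap_cons, h2, List.foldl_cons, ih]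

-- pvAdj on a weakly increasing tail whose elements all dominate the previous value
theorem pvAdj_some (t : List String) (v : String)
    (hs : t.Pairwise (· ≤ ·)) (hv : ∀ x ∈ t, v ≤ x) :
    (pvAdj (some v) t).Pairwise (· < ·) ∧ (∀ x, x ∈ pvAdj (some v) t ↔ x ∈ t ∧ x ≠ v)
    ∧ (∀ x ∈ pvAdj (some v) t, v < x) := by
  induction t generalizing v with
  | nil => simp [pvAdj]
  | cons m t ih =>
    rcases List.pairwise_cons.mp hs with ⟨hm, ht⟩
    by_cases hmv : m = v
    · subst hmv
      have h := ih m ht hm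
      have hstep : pvAdj (some m) (m :: t) = pvAdj (some m) t := by
        simp [pvAdj]
      rw [hstep]
      refine ⟨h.1, fun x => ?_, h.2.2⟩
      rw [h.2.1 x]
      constructor
      · rintro ⟨hx, hne⟩; exact ⟨List.mem_cons_of_mem _ hx, hne⟩
      · rintro ⟨hx, hne⟩
        rcases List.mem_cons.mp hx with hh | hh
        · exact absurd hh hne
        · exact ⟨hh, hne⟩
    · have hvm : v < m := lt_of_le_of_ne (hv m (List.mem_cons_self)) (fun h => hmv h.symm)
      have ihm := ih m ht hm
      have hstep : pvAdj (some v) (m :: t) = m :: pvAdj (some m) t := by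
        show (if some m ≠ some v then m :: pvAdj (some m) t else pvAdj (some v) t)
            = m :: pvAdj (some m) t
        rw [if_pos (by simpa using hmv)]
      refine ⟨?_, ?_, ?_⟩
      · rw [hstep]
        exact List.pairwise_cons.mpr ⟨fun y hy => ihm.2.2 y hy, ihm.1⟩
      · intro x
        rw [hstep]
        constructor
        · intro hx
          rcases List.mem_cons.mp hx with h | h
          · exact ⟨by simp [h], by simp [h]; exact fun hxe => hmv hxe⟩
          · rcases (ihm.2.1 x).mp h with ⟨hxt, _⟩
            exact ⟨List.mem_cons_of_mem _ hxt, ne_of_gt (lt_of_lt_of_le hvm (hm x hxt))⟩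
        · rintro ⟨hx, hxv⟩
          rcases List.mem_cons.mp hx with h | h
          · exact h ▸ List.mem_cons_self
          · by_cases hxm : x = m
            · exact hxm ▸ List.mem_cons_self
            · exact List.mem_cons_of_mem _ ((ihm.2.1 x).mpr ⟨h, hxm⟩)
      · intro x hx
        rw [hstep] at hx
        rcases List.mem_cons.mp hx with h | h
        · exact h ▸ hvm
        · exact lt_trans hvm (ihm.2.2 x h)

theorem pvAdj_none (l : List String) (hs : l.Pairwise (· ≤ ·)) :
    (pvAdj none l).Pairwise (· < ·) ∧ (∀ x, x ∈ pvAdj none l ↔ x ∈ l) := by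
  cases l with
  | nil => simp [pvAdj]
  | cons n t =>
    rcases List.pairwise_cons.mp hs with ⟨hn, ht⟩
    have h := pvAdj_some t n ht hn
    have hstep : pvAdj none (n :: t) = n :: pvAdj (some n) t := by simp [pvAdj]
    refine ⟨?_, ?_⟩
    · rw [hstep]
      exact List.pairwise_cons.mpr ⟨fun y hy => h.2.2 y hy, h.1⟩
    · intro x
      rw [hstep]
      constructor
      · intro hx
        rcases List.mem_cons.mp hx with hh | hh
        · exact hh ▸ List.mem_cons_self
        · exact List.mem_cons_of_mem _ ((h.2.1 x).mp hh).1
      · intro hx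
        rcases List.mem_cons.mp hx with hh | hh
        · exact hh ▸ List.mem_cons_self
        · by_cases hxn : x = n
          · exact hxn ▸ List.mem_cons_self
          · exact List.mem_cons_of_mem _ ((h.2.1 x).mpr ⟨hh, hxn⟩)

-- ===== VERDICT (by name: the statement is the Claim_ definition above) =====
theorem normalize_neural_branches_spec : Claim_equal_normalize_neural_branches := by
  intro branches _
  show PySem.List.sorted (branches.foldl pvStepA ((PySem.Set.empty : PySem.Set String), ([] : List String))).2 (fun x => x) false
      = ((PySem.List.sorted (branches.filterMap pvStripOpt) (fun x => x) false).foldl pvStepB ([], none)).1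
  have hA : (branches.foldl pvStepA ((PySem.Set.empty : PySem.Set String), ([] : List String))).2
      = PySem.Set.ofList (branches.filterMap pvStripOpt) := by
    rw [show ((PySem.Set.empty : PySem.Set String), ([] : List String))
          = (([] : List String), ([] : List String)) from rfl]
    rw [pvA_pair branches [], pvA_set branches [], PySem.Set.ofList_eq_foldl]
  rw [hA]
  have hB := pvAdj_foldl (PySem.List.sorted (branches.filterMap pvStripOpt) (fun x => x) false) [] none
  rw [hB, List.nil_append]
  set sn := PySem.List.sorted (branches.filterMap pvStripOpt) (fun x => x) false with hsn
  have hpw : sn.Pairwise (· ≤ ·) := by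
    have := PySem.List.sorted_pairwise (branches.filterMap pvStripOpt) (fun x => x)
    simpa [hsn] using this
  have hadj := pvAdj_none sn hpw
  have hnodup : (pvAdj none sn).Nodup := List.Pairwise.imp (fun h => ne_of_lt h) hadj.1
  have hmem : ∀ x, x ∈ pvAdj none sn ↔ x ∈ PySem.Set.ofList (branches.filterMap pvStripOpt) := by
    intro x
    rw [hadj.2 x, PySem.Set.mem_ofList, hsn, PySem.List.mem_sorted]
  have hperm : (pvAdj none sn).Perm (PySem.Set.ofList (branches.filterMap pvStripOpt)) :=
    (List.perm_ext_iff_of_nodup hnodup (PySem.Set.nodup_ofList _)).mpr hmem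
  exact PySem.List.sorted_eq_of_perm_of_pairwise_lt _ _ _ hperm hadj.1
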